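-- pv_equiv track=rewrite | github.com/Held0fTheWelt/BLACKVEIN | world-engine/app/story_runtime/commit_models.py | _dominant_continuity_class
-- ===== SOURCE A (Python) =====
-- from typing import Any, Literal
--
-- _PRESSURE_SIGNAL_ORDER = (
--     "tension_escalation",
--     "dignity_injury",
--     "blame_pressure",
--     "alliance_shift",
--     "repair_attempt",
-- )
--
-- def _dominant_continuity_class(impacts: list[dict[str, Any]]) -> str | None:
--     """Pick the most salient continuity-impact class in precedence order.
--
--     The live continuity-impact list can carry multiple classes per turn; the
--     pressure_state slot on BeatProgression needs a single dominant label so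
--     downstream director logic has a stable scalar to key off. Precedence is
--     deliberately drama-weighted (escalation > dignity > blame > alliance >
--     repair) rather than first-emitted.
--     """
--     if not isinstance(impacts, list):
--         return None
--     present = [
--         str(x.get("class") or x.get("continuity_class") or "").strip()
--         for x in impacts
--         if isinstance(x, dict)
--     ]
--     present = [p for p in present if p]
--     if not present:
--         return None
--     for label in _PRESSURE_SIGNAL_ORDER:
--         if label in present:
--             return label
--     return present[0]
-- ===== SOURCE B (Python) =====
-- from typing import Any
--
-- _PRESSURE_SIGNAL_ORDER = (
--     "tension_escalation",
--     "dignity_injury",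
--     "blame_pressure",
--     "alliance_shift",
--     "repair_attempt",
-- )
--
-- _RANK = {label: i for i, label in enumerate(_PRESSURE_SIGNAL_ORDER)}
--
--
-- def _dominant_continuity_class(impacts: "list[dict[str, Any]]") -> "str | None":
--     """Single pass: keep the first label of minimal precedence rank seen so far
--     (unknown labels get the sentinel rank len(_PRESSURE_SIGNAL_ORDER), so an
--     all-unknown list yields its first non-empty label)."""
--     if not isinstance(impacts, list):
--         return None
--     best = None  # (rank, label), first occurrence wins on equal rank
--     for x in impacts:
--         if not isinstance(x, dict):
--             continue
--         p = str(x.get("class") or x.get("continuity_class") or "").strip()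
--         if not p:
--             continue
--         r = _RANK.get(p, len(_PRESSURE_SIGNAL_ORDER))
--         if best is None or r < best[0]:
--             best = (r, p)
--     return best[1] if best is not None else None
-- ===== Notes on version B (the rewrite author's own statement) =====
-- stated objective: alternative
-- what changed: Replaced the build-full-list-then-scan-precedence-order-with-membership-tests structure by a single pass over impacts that keeps the first label of minimal rank (ranks from a dict built once from the order tuple, unknown labels get a sentinel rank), so no intermediate 'present' list and no inner membership scans.
import Mathlib
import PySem

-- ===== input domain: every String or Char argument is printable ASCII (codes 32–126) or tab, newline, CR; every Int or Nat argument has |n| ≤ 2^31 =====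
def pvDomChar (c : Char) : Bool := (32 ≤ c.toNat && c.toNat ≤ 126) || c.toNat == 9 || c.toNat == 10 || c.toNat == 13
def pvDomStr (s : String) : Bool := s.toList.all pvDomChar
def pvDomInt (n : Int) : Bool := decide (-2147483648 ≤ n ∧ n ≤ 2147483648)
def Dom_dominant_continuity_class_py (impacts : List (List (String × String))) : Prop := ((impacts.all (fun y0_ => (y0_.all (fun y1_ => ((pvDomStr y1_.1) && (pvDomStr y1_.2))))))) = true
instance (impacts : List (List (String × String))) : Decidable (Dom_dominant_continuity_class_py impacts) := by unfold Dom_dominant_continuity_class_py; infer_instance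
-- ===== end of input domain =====

-- B replaces A's "build `present`, then scan the precedence tuple with membership tests"
-- by a single fold keeping the first minimal-rank label (rank dict built once); alternative decomposition, same result.

-- ===== PORT A =====
-- _PRESSURE_SIGNAL_ORDER (same-module constant, used by both versions)
def pvOrder : List String :=
  ["tension_escalation", "dignity_injury", "blame_pressure", "alliance_shift", "repair_attempt"]

-- str(x.get("class") or x.get("continuity_class") or "").strip() — identical expression in both Pythons
def pvGetClass (x : List (String × String)) : String :=
  let a := (PySem.Dict.mk x).get? "class"
  let b := (PySem.Dict.mk x).get? "continuity_class"
  let raw : String :=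
    match a with
    | some s =>
        if s ≠ "" then s
        else match b with
             | some t => if t ≠ "" then t else ""
             | none => ""
    | none =>
        match b with
        | some t => if t ≠ "" then t else ""
        | none => ""
  PySem.Str.strip raw

def dominant_continuity_class_py (impacts : List (List (String × String))) : Option String :=
  -- present = [str(...).strip() for x in impacts]; present = [p for p in present if p]
  let present := (impacts.map pvGetClass).filter (fun p => p ≠ "")
  if present = [] then none
  else
    -- for label in _PRESSURE_SIGNAL_ORDER: if label in present: return label
    match pvOrder.find? (fun label => present.contains label) with
    | some label => some label
    | none => some (present.headD "")    -- return present[0] (present nonempty here)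

-- ===== PORT B =====
-- _RANK = {label: i for i, label in enumerate(_PRESSURE_SIGNAL_ORDER)}
def pvRank : PySem.Dict String Int :=
  PySem.Dict.ofList ((PySem.List.enumerate pvOrder).map (fun p => (p.2, p.1)))

def dominant_continuity_class_py_alt (impacts : List (List (String × String))) : Option String :=
  let best :=
    impacts.foldl
      (fun (best : Option (Int × String)) x =>
        let p := pvGetClass x
        if p = "" then best
        else
          let r := pvRank.getD p (pvOrder.length : Int)
          match best with
          | none => some (r, p)
          | some (br, _) => if r < br then some (r, p) else best)
      none
  match best with
  | some (_, p) => some p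
  | none => none

-- ===== PRECONDITION & SPEC =====
def Spec_dominant_continuity_class_py (impacts : List (List (String × String))) (out : Option String) : Prop := out = dominant_continuity_class_py_alt impacts
instance (impacts : List (List (String × String))) (out : Option String) : Decidable (Spec_dominant_continuity_class_py impacts out) := by unfold Spec_dominant_continuity_class_py; infer_instance

-- ===== CLAIM (what is proved, stated in full; the proofs are below) =====
def Claim_equal_dominant_continuity_class_py : Prop := ∀ (impacts : List (List (String × String))), Dom_dominant_continuity_class_py impacts → Spec_dominant_continuity_class_py impacts (dominant_continuity_class_py impacts)

-- ===== LEMMAS AND PROOFS =====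

-- rank of a label as B computes it
def pvRk (p : String) : Int := pvRank.getD p (pvOrder.length : Int)

-- the per-label step of B's fold, on the filtered value
def pvStep (best : Option (Int × String)) (p : String) : Option (Int × String) :=
  match best with
  | none => some (pvRk p, p)
  | some (br, _) => if pvRk p < br then some (pvRk p, p) else best

theorem pvRank_eq_mk : pvRank = PySem.Dict.mk [("tension_escalation",0),("dignity_injury",1),("blame_pressure",2),("alliance_shift",3),("repair_attempt",4)] := by decide

theorem pvRk_eq (p : String) :
    pvRk p = if p = "tension_escalation" then 0 else if p = "dignity_injury" then 1
      else if p = "blame_pressure" then 2 else if p = "alliance_shift" then 3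
      else if p = "repair_attempt" then 4 else 5 := by
  by_cases h1 : p = "tension_escalation"
  · subst h1; decide
  by_cases h2 : p = "dignity_injury"
  · subst h2; decide
  by_cases h3 : p = "blame_pressure"
  · subst h3; decide
  by_cases h4 : p = "alliance_shift"
  · subst h4; decide
  by_cases h5 : p = "repair_attempt"
  · subst h5; decide
  rw [if_neg h1, if_neg h2, if_neg h3, if_neg h4, if_neg h5, pvRk, pvRank_eq_mk]
  simp only [PySem.Dict.getD, PySem.Dict.get?_mk_cons, beq_iff_eq]
  rw [if_neg (fun h => h1 h.symm), if_neg (fun h => h2 h.symm), if_neg (fun h => h3 h.symm),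
      if_neg (fun h => h4 h.symm), if_neg (fun h => h5 h.symm)]
  simp [PySem.Dict.get?, pvOrder]

theorem pvRk_nonneg (p : String) : 0 ≤ pvRk p := by
  rw [pvRk_eq]; split_ifs <;> norm_num

theorem pvRk_le_five (p : String) : pvRk p ≤ 5 := by
  rw [pvRk_eq]; split_ifs <;> norm_num

-- B's fold over impacts equals pvStep folded over A's filtered `present` list
theorem foldl_eq_present (l : List (List (String × String))) (b : Option (Int × String)) :
    l.foldl
      (fun (best : Option (Int × String)) x =>
        let p := pvGetClass x
        if p = "" then best
        else
          let r := pvRank.getD p (pvOrder.length : Int)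
          match best with
          | none => some (r, p)
          | some (br, _) => if r < br then some (r, p) else best)
      b
    = ((l.map pvGetClass).filter (fun p => p ≠ "")).foldl pvStep b := by
  induction l generalizing b with
  | nil => rfl
  | cons x xs ih =>
      simp only [List.foldl_cons, List.map_cons, List.filter_cons]
      by_cases h : pvGetClass x = "" <;>
        simp [h, ih, pvStep, pvRk]

-- if every remaining rank is 5, the accumulator with rank 5 survives
theorem foldl_all_five (l : List String) (p : String)
    (h : ∀ q ∈ l, pvRk q = 5) :
    l.foldl pvStep (some (5, p)) = some (5, p) := by
  induction l with
  | nil => rfl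
  | cons q l ih =>
      have hq := h q (by simp)
      simp only [List.foldl_cons, pvStep, hq]
      norm_num
      exact ih (fun q hq' => h q (by simp [hq']))

-- fold invariant: result exists, its rank is minimal, and it is the accumulator or an element
theorem foldl_props (l : List String) :
    ∀ (xr : Int) (xp : String), pvRk xp = xr →
    ∃ r p, l.foldl pvStep (some (xr, xp)) = some (r, p) ∧ r ≤ xr ∧ (∀ q ∈ l, r ≤ pvRk q) ∧
      pvRk p = r ∧ ((r = xr ∧ p = xp) ∨ p ∈ l) := by
  induction l with
  | nil => exact fun xr xp hx => ⟨xr, xp, rfl, le_refl _, by simp, hx, Or.inl ⟨rfl, rfl⟩⟩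
  | cons q l ih =>
      intro xr xp hx
      simp only [List.foldl_cons, pvStep]
      by_cases h : pvRk q < xr
      · rw [if_pos h]
        obtain ⟨r, p, heq, hle, hall, hrk, hmem⟩ := ih (pvRk q) q rfl
        refine ⟨r, p, heq, le_trans hle h.le, ?_, hrk, ?_⟩
        · intro q' hq'
          rcases List.mem_cons.mp hq' with rfl | hm
          · exact hle
          · exact hall _ hm
        · rcases hmem with ⟨_, rfl⟩ | hm
          · exact Or.inr (by simp)
          · exact Or.inr (by simp [hm])
      · rw [if_neg h]
        obtain ⟨r, p, heq, hle, hall, hrk, hmem⟩ := ih xr xp hx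
        refine ⟨r, p, heq, hle, ?_, hrk, ?_⟩
        · intro q' hq'
          rcases List.mem_cons.mp hq' with rfl | hm
          · exact le_trans hle (not_lt.mp h)
          · exact hall _ hm
        · rcases hmem with hx' | hm
          · exact Or.inl hx'
          · exact Or.inr (by simp [hm])

-- rank r < 5 pins the label
theorem pvRk_eq_zero (p : String) (h : pvRk p = 0) : p = "tension_escalation" := by
  rw [pvRk_eq] at h; split_ifs at h <;> first | assumption | omega
theorem pvRk_eq_one (p : String) (h : pvRk p = 1) : p = "dignity_injury" := by
  rw [pvRk_eq] at h; split_ifs at h <;> first | assumption | omega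
theorem pvRk_eq_two (p : String) (h : pvRk p = 2) : p = "blame_pressure" := by
  rw [pvRk_eq] at h; split_ifs at h <;> first | assumption | omega
theorem pvRk_eq_three (p : String) (h : pvRk p = 3) : p = "alliance_shift" := by
  rw [pvRk_eq] at h; split_ifs at h <;> first | assumption | omega
theorem pvRk_eq_four (p : String) (h : pvRk p = 4) : p = "repair_attempt" := by
  rw [pvRk_eq] at h; split_ifs at h <;> first | assumption | omega

-- A's order-scan over `present` agrees with B's minimal-rank fold over `present`
theorem pv_main_present (present : List String) :
    (if present = [] then none
     else match pvOrder.find? (fun label => present.contains label) with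
          | some label => some label
          | none => some (present.headD ""))
    = (match present.foldl pvStep none with
       | some (_, p) => some p
       | none => none) := by
  cases present with
  | nil => rfl
  | cons p₀ ps =>
      rw [if_neg (by simp)]
      have hfold : (p₀ :: ps).foldl pvStep none = ps.foldl pvStep (some (pvRk p₀, p₀)) := rfl
      obtain ⟨r, p, heq, hle, hall, hrk, hmem⟩ := foldl_props ps (pvRk p₀) p₀ rfl
      have hallp : ∀ q ∈ p₀ :: ps, r ≤ pvRk q := by
        intro q hq
        rcases List.mem_cons.mp hq with rfl | h
        · exact hle
        · exact hall _ h
      have hpmem : p ∈ p₀ :: ps := by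
        rcases hmem with ⟨_, rfl⟩ | h
        · exact List.mem_cons_self
        · exact List.mem_cons_of_mem _ h
      have hr0 : 0 ≤ r := hrk ▸ pvRk_nonneg p
      rw [hfold, heq]
      by_cases c0 : "tension_escalation" ∈ p₀ :: ps
      · have hub := hallp _ c0
        have : r = 0 := by rw [show pvRk "tension_escalation" = 0 from by decide] at hub; omega
        have hp : p = "tension_escalation" := pvRk_eq_zero p (hrk.trans this)
        have hc : ((p₀ :: ps).contains "tension_escalation") = true := List.contains_iff_mem.mpr c0
        rw [pvOrder, List.find?_cons_of_pos hc, hp]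
      · have hc0 : ¬ ((p₀ :: ps).contains "tension_escalation") = true := by
          simp [c0]
        have hne0 : r ≠ 0 := fun h => c0 (pvRk_eq_zero p (hrk.trans h) ▸ hpmem)
        by_cases c1 : "dignity_injury" ∈ p₀ :: ps
        · have hub := hallp _ c1
          have : r = 1 := by rw [show pvRk "dignity_injury" = 1 from by decide] at hub; omega
          have hp : p = "dignity_injury" := pvRk_eq_one p (hrk.trans this)
          have hc : ((p₀ :: ps).contains "dignity_injury") = true := List.contains_iff_mem.mpr c1
          rw [pvOrder, List.find?_cons_of_neg hc0, List.find?_cons_of_pos hc, hp]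
        · have hc1 : ¬ ((p₀ :: ps).contains "dignity_injury") = true := by
            simp [c1]
          have hne1 : r ≠ 1 := fun h => c1 (pvRk_eq_one p (hrk.trans h) ▸ hpmem)
          by_cases c2 : "blame_pressure" ∈ p₀ :: ps
          · have hub := hallp _ c2
            have : r = 2 := by rw [show pvRk "blame_pressure" = 2 from by decide] at hub; omega
            have hp : p = "blame_pressure" := pvRk_eq_two p (hrk.trans this)
            have hc : ((p₀ :: ps).contains "blame_pressure") = true := List.contains_iff_mem.mpr c2
            rw [pvOrder, List.find?_cons_of_neg hc0, List.find?_cons_of_neg hc1,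
                List.find?_cons_of_pos hc, hp]
          · have hc2 : ¬ ((p₀ :: ps).contains "blame_pressure") = true := by
              simp [c2]
            have hne2 : r ≠ 2 := fun h => c2 (pvRk_eq_two p (hrk.trans h) ▸ hpmem)
            by_cases c3 : "alliance_shift" ∈ p₀ :: ps
            · have hub := hallp _ c3
              have : r = 3 := by rw [show pvRk "alliance_shift" = 3 from by decide] at hub; omega
              have hp : p = "alliance_shift" := pvRk_eq_three p (hrk.trans this)
              have hc : ((p₀ :: ps).contains "alliance_shift") = true := List.contains_iff_mem.mpr c3
              rw [pvOrder, List.find?_cons_of_neg hc0, List.find?_cons_of_neg hc1,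
                  List.find?_cons_of_neg hc2, List.find?_cons_of_pos hc, hp]
            · have hc3 : ¬ ((p₀ :: ps).contains "alliance_shift") = true := by
                simp [c3]
              have hne3 : r ≠ 3 := fun h => c3 (pvRk_eq_three p (hrk.trans h) ▸ hpmem)
              by_cases c4 : "repair_attempt" ∈ p₀ :: ps
              · have hub := hallp _ c4
                have : r = 4 := by rw [show pvRk "repair_attempt" = 4 from by decide] at hub; omega
                have hp : p = "repair_attempt" := pvRk_eq_four p (hrk.trans this)
                have hc : ((p₀ :: ps).contains "repair_attempt") = true := List.contains_iff_mem.mpr c4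
                rw [pvOrder, List.find?_cons_of_neg hc0, List.find?_cons_of_neg hc1,
                    List.find?_cons_of_neg hc2, List.find?_cons_of_neg hc3,
                    List.find?_cons_of_pos hc, hp]
              · have hc4 : ¬ ((p₀ :: ps).contains "repair_attempt") = true := by
                  simp [c4]
                -- every label in `present` is unknown: the fold keeps the head
                have hall5 : ∀ q ∈ p₀ :: ps, pvRk q = 5 := by
                  intro q hq
                  have h0 := pvRk_nonneg q
                  have h5 := pvRk_le_five q
                  by_contra hne
                  have : pvRk q = 0 ∨ pvRk q = 1 ∨ pvRk q = 2 ∨ pvRk q = 3 ∨ pvRk q = 4 := by omega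
                  rcases this with h | h | h | h | h
                  · exact c0 (pvRk_eq_zero q h ▸ hq)
                  · exact c1 (pvRk_eq_one q h ▸ hq)
                  · exact c2 (pvRk_eq_two q h ▸ hq)
                  · exact c3 (pvRk_eq_three q h ▸ hq)
                  · exact c4 (pvRk_eq_four q h ▸ hq)
                have hp0 : pvRk p₀ = 5 := hall5 p₀ List.mem_cons_self
                have h55 : ps.foldl pvStep (some (5, p₀)) = some (5, p₀) :=
                  foldl_all_five ps p₀ (fun q hq => hall5 q (List.mem_cons_of_mem _ hq))
                rw [pvOrder, List.find?_cons_of_neg hc0, List.find?_cons_of_neg hc1,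
                    List.find?_cons_of_neg hc2, List.find?_cons_of_neg hc3,
                    List.find?_cons_of_neg hc4]
                have hfin : ps.foldl pvStep (some (pvRk p₀, p₀)) = some (5, p₀) := by
                  rw [hp0]; exact h55
                have hpair : (5, p₀) = (r, p) := Option.some.inj (hfin.symm.trans heq)
                have hpp : p = p₀ := ((Prod.mk.injEq _ _ _ _).mp hpair).2.symm
                simp [List.find?, hpp]

-- ===== VERDICT (by name: the statement is the Claim_ definition above) =====
theorem dominant_continuity_class_py_spec : Claim_equal_dominant_continuity_class_py := by
  intro impacts _
  unfold Spec_dominant_continuity_class_py dominant_continuity_class_py dominant_continuity_class_py_alt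
  rw [foldl_eq_present]
  exact pv_main_present ((impacts.map pvGetClass).filter (fun p => p ≠ ""))
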